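-- pv_equiv track=rewrite | github.com/Raven-98/PyQMLWebBr | adblock.py | _checkInverseDomains
-- ===== SOURCE A (Python) =====
-- def _checkInverseDomains(list):
--     t = 0
--     for item in list:
--         if item.startswith("~"):
--             t += 1
--     if t == len(list):
--         return True
--     if t == 0:
--         return False
--     return None
-- ===== SOURCE B (Python) =====
-- def _checkInverseDomains(list):
--     if not list:
--         return True
--     first = list[0].startswith("~")
--     for item in list[1:]:
--         if item.startswith("~") != first:
--             return None
--     return first
-- ===== Notes on version B (the rewrite author's own statement) =====
-- stated objective: alternative
-- what changed: Instead of counting matches over the whole list and comparing with the length, B takes the first item's startswith flag as a reference, returns None with an early exit at the first disagreeing item, and otherwise returns the first flag (empty list returns True directly).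
import Mathlib
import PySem

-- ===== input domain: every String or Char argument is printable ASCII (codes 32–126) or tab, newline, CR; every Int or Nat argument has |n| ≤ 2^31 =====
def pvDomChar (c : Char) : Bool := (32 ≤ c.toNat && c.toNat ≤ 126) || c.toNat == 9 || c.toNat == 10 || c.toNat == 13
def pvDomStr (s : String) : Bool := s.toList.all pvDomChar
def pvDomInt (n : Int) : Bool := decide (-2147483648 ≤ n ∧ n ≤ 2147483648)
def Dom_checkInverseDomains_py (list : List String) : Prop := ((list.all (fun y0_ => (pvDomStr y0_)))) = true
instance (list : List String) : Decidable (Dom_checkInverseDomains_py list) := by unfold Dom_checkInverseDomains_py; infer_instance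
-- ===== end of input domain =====

-- ===== PORT A =====
-- B drops A's count-and-compare: it uses the first item's flag as a reference and
-- early-exits with None at the first disagreeing item (alternative decomposition).
def checkInverseDomains_py (list : List String) : Option Bool :=
  let t := list.foldl (fun t item => if PySem.Str.startswith item "~" then t + 1 else t) 0
  if t = list.length then some true
  else if t = 0 then some false
  else none

-- ===== PORT B =====
-- walk the tail: None at the first item whose flag differs from the first item's flag
def cidWalk (first : Bool) : List String → Option Bool
  | [] => some first
  | item :: rest =>
      if PySem.Str.startswith item "~" ≠ first then none else cidWalk first rest

def checkInverseDomains_py_alt (list : List String) : Option Bool :=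
  match list with
  | [] => some true
  | x :: xs => cidWalk (PySem.Str.startswith x "~") xs

-- ===== PRECONDITION & SPEC =====
def Spec_checkInverseDomains_py (list : List String) (out : Option Bool) : Prop := out = checkInverseDomains_py_alt list
instance (list : List String) (out : Option Bool) : Decidable (Spec_checkInverseDomains_py list out) := by unfold Spec_checkInverseDomains_py; infer_instance

-- ===== CLAIM (what is proved, stated in full; the proofs are below) =====
def Claim_equal_checkInverseDomains_py : Prop := ∀ (list : List String), Dom_checkInverseDomains_py list → Spec_checkInverseDomains_py list (checkInverseDomains_py list)

-- ===== LEMMAS AND PROOFS =====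
lemma cid_count (list : List String) (n : Nat) :
    list.foldl (fun t item => if PySem.Str.startswith item "~" then t + 1 else t) n
      = n + list.countP (fun item => PySem.Str.startswith item "~") := by
  induction list generalizing n with
  | nil => simp
  | cons x xs ih =>
      simp only [List.foldl_cons, List.countP_cons, ih]
      split_ifs with h
      · simp; omega
      · simp

lemma cid_countP (list : List String) :
    list.foldl (fun t item => if PySem.Str.startswith item "~" then t + 1 else t) 0
      = list.countP (fun item => PySem.Str.startswith item "~") := by
  simpa using cid_count list 0

lemma cidWalk_eq (f : Bool) (xs : List String) :
    cidWalk f xs =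
      if xs.all (fun item => PySem.Str.startswith item "~" == f) then some f else none := by
  induction xs with
  | nil => simp [cidWalk]
  | cons x xs ih =>
      simp only [cidWalk, ih, List.all_cons]
      split_ifs <;> simp_all
      rename_i h1 h2
      obtain ⟨a, ha, hn⟩ := h1
      exact hn (h2 a ha)

-- ===== VERDICT (by name: the statement is the Claim_ definition above) =====
theorem checkInverseDomains_py_spec : Claim_equal_checkInverseDomains_py := by
  intro list _
  unfold Spec_checkInverseDomains_py checkInverseDomains_py
  match list with
  | [] => simp [checkInverseDomains_py_alt]
  | x :: xs =>
      simp only [checkInverseDomains_py_alt, cidWalk_eq, cid_countP]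
      set p := fun item => PySem.Str.startswith item "~" with hp
      cases hc : xs.all (fun item => p item == p x) with
      | true =>
          have hall : ∀ a ∈ xs, p a = p x := by
            intro a ha
            have := (List.all_eq_true.mp hc) a ha
            exact eq_of_beq this
          cases hx : p x with
          | true =>
              have hlen : (x :: xs).countP p = (x :: xs).length := by
                rw [List.countP_eq_length]
                intro a ha
                rcases List.mem_cons.mp ha with rfl | h
                · exact hx
                · rw [hall a h]; exact hx
              rw [hlen, if_pos rfl]
              simp only [hp] at hx
              simpa [PySem.Str.startswith] using hx
          | false =>
              have h0 : (x :: xs).countP p = 0 := by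
                rw [List.countP_eq_zero]
                intro a ha
                rcases List.mem_cons.mp ha with rfl | h
                · simp [hx]
                · rw [hall a h, hx]; simp
              rw [h0]
              have : (x :: xs).length ≠ 0 := by simp
              rw [if_neg (Ne.symm this)]
              simp only [hp] at hx
              simpa [PySem.Str.startswith] using hx
      | false =>
          have ⟨a, ha, hne⟩ : ∃ a ∈ xs, p a ≠ p x := by
            by_contra h
            push Not at h
            have : xs.all (fun item => p item == p x) = true :=
              List.all_eq_true.mpr (fun a ha => beq_iff_eq.mpr (h a ha))
            simp [this] at hc
          have hpos : 0 < (x :: xs).countP p := by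
            cases hx : p x with
            | true => exact List.countP_pos_iff.mpr ⟨x, List.mem_cons_self, hx⟩
            | false =>
                refine List.countP_pos_iff.mpr ⟨a, List.mem_cons_of_mem _ ha, ?_⟩
                rw [hx] at hne
                cases h : p a
                · exact absurd h hne
                · rfl
          have hlt : (x :: xs).countP p < (x :: xs).length := by
            cases hx : p x with
            | false => exact List.countP_lt_length_iff.mpr ⟨x, List.mem_cons_self, by simp [hx]⟩
            | true =>
                refine List.countP_lt_length_iff.mpr ⟨a, List.mem_cons_of_mem _ ha, ?_⟩
                rw [hx] at hne
                simpa using hne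
          rw [if_neg (by omega), if_neg (by omega)]
          simp
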